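-- pv_equiv track=rewrite | github.com/gadoti03/fastapi-spid-authentication | file.py | max_equal_parts_for_prefixes
-- ===== SOURCE A (Python) =====
-- from math import gcd
--
-- def count_freq(s):
--     """Return frequency dictionary of characters in string"""
--     freq = {}
--
--     for c in s:
--         if c not in freq:
--             freq[c] = 0
--         freq[c] += 1
--
--     return freq
--
-- def gcd_list(values):
--     """Compute gcd of a list of integers"""
--     g = values[0]
--
--     for v in values[1:]:
--         g = gcd(g, v)
--
--     return g
--
-- def max_equal_parts_for_prefixes(packages: str):
--
--     n = len(packages)
--     results = []
--
--     for k in range(1, n + 1):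
--
--         prefix = packages[:k]
--         freq = count_freq(prefix)
--
--         g = gcd_list(list(freq.values()))
--
--         best = 1
--
--         for m in range(g, 0, -1):
--
--             if k % m != 0:
--                 continue
--
--             segment_len = k // m
--             target = count_freq(prefix[:segment_len])
--
--             valid = True
--
--             for i in range(1, m):
--
--                 segment = prefix[i * segment_len:(i + 1) * segment_len]
--
--                 if count_freq(segment) != target:
--                     valid = False
--                     break
--
--             if valid:
--                 best = m
--                 break
--
--         results.append(best)
--
--     return results
-- ===== SOURCE B (Python) =====
-- from math import gcd
--
-- def max_equal_parts_for_prefixes(packages: str):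
--     # prefix-count snapshots: snaps[j] maps each char to its number of
--     # occurrences in packages[:j]; built once in O(n * alphabet)
--     snaps = [{}]
--     run = {}
--     for c in packages:
--         run[c] = run.get(c, 0) + 1
--         snaps.append(run.copy())
--     results = []
--     for k in range(1, len(packages) + 1):
--         total = snaps[k]
--         g = 0
--         for v in total.values():
--             g = gcd(g, v)
--         best = 1
--         for m in range(g, 0, -1):
--             if k % m != 0:
--                 continue
--             L = k // m
--             # the m segments all have equal frequency iff every boundary
--             # prefix count is proportional: count(packages[:i*L], c) * m == count(packages[:k], c) * i
--             if all(snaps[i * L].get(c, 0) * m == v * i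
--                    for i in range(1, m) for c, v in total.items()):
--                 best = m
--                 break
--         results.append(best)
--     return results
-- ===== Notes on version B (the rewrite author's own statement) =====
-- stated objective: faster
-- what changed: Instead of re-counting every prefix and every segment from scratch with count_freq (O(n) work inside each candidate check), B builds per-prefix character-count snapshots once and decides a candidate split m by the boundary-proportionality test count(prefix[:i*L],c)*m == count(prefix[:k],c)*i on the snapshots, removing all inner recounting passes.
import Mathlib
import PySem

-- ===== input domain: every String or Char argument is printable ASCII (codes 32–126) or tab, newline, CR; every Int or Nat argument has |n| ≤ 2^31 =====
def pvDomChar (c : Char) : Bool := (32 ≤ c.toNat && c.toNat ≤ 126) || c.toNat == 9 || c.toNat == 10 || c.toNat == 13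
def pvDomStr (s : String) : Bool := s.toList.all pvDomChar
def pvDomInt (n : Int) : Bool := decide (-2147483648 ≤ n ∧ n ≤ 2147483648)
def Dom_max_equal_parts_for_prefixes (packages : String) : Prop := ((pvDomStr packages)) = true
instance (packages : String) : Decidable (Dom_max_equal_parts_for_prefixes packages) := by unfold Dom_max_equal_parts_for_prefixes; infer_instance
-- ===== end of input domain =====

-- B replaces A's repeated count_freq recounting of prefixes and segments by per-prefix
-- character-count snapshots built once, checking a candidate split via boundary
-- proportionality on the snapshots (faster; a timing run measures the speed-up).


-- ===== PORT A =====
def count_freq (s : List Char) : PySem.Dict Char Int :=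
  s.foldl (fun freq c =>
    let f1 := if freq.contains c then freq else freq.insert c (0 : Int)
    f1.insert c (f1.getD c 0 + 1)) PySem.Dict.empty

-- values[0] would raise on an empty list, but every call site passes a nonempty list
def gcd_list (values : List Int) : Int :=
  (PySem.List.slice values (some 1) none).foldl (fun g v => (Int.gcd g v : Int))
    (PySem.List.pyGetD values 0 0)

-- Python dict == / != compares the two dicts as mappings (order-insensitive)
def pyDictEq (d1 d2 : PySem.Dict Char Int) : Bool :=
  d1.keys.all (fun c => d2.contains c && (d1.getD c 0 == d2.getD c 0)) &&
  d2.keys.all (fun c => d1.contains c)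

-- the 'for i in range(1, m)' loop with the valid flag and break
def validLoopA (pre : List Char) (target : PySem.Dict Char Int) (L : Int) : List Int → Bool
  | [] => true
  | i :: rest =>
    if pyDictEq (count_freq (PySem.List.slice pre (some (i * L)) (some ((i + 1) * L)))) target
    then validLoopA pre target L rest
    else false

-- the 'for m in range(g, 0, -1)' loop with continue / break
def mLoopA (pre : List Char) (k : Int) : List Int → Int → Int
  | [], best => best
  | m :: rest, best =>
    if PySem.Int.mod k m ≠ 0 then mLoopA pre k rest best
    else
      let L := PySem.Int.floordiv k m
      let target := count_freq (PySem.List.slice pre none (some L))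
      if validLoopA pre target L (PySem.List.pyRange 1 m 1) then m
      else mLoopA pre k rest best

def max_equal_parts_for_prefixes (packages : String) : List Int :=
  let s := packages.toList
  let n := (s.length : Int)
  (PySem.List.pyRange 1 (n + 1) 1).foldl (fun results k =>
    let pre := PySem.List.slice s none (some k)
    let freq := count_freq pre
    let g := gcd_list freq.values
    let best := mLoopA pre k (PySem.List.pyRange g 0 (-1)) 1
    results ++ [best]) []

-- ===== PORT B =====
-- snaps[j] is the running counter after the first j characters (run.copy() appended each step)
def buildSnaps : List Char → PySem.Dict Char Int → List (PySem.Dict Char Int)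
  | [], _ => []
  | c :: cs, run =>
    let run' := run.insert c (run.getD c 0 + 1)
    run' :: buildSnaps cs run'

-- all(snaps[i*L].get(c,0)*m == v*i for i in range(1,m) for c,v in total.items())
def validB (snaps : List (PySem.Dict Char Int)) (total : PySem.Dict Char Int) (m L : Int) : Bool :=
  (PySem.List.pyRange 1 m 1).all (fun i =>
    total.items.all (fun cv =>
      (PySem.List.pyGetD snaps (i * L) PySem.Dict.empty).getD cv.1 0 * m == cv.2 * i))

def mLoopB (snaps : List (PySem.Dict Char Int)) (total : PySem.Dict Char Int) (k : Int) :
    List Int → Int → Int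
  | [], best => best
  | m :: rest, best =>
    if PySem.Int.mod k m ≠ 0 then mLoopB snaps total k rest best
    else if validB snaps total m (PySem.Int.floordiv k m) then m
    else mLoopB snaps total k rest best

def max_equal_parts_for_prefixes_alt (packages : String) : List Int :=
  let s := packages.toList
  let snaps := PySem.Dict.empty :: buildSnaps s PySem.Dict.empty
  (PySem.List.pyRange 1 ((s.length : Int) + 1) 1).foldl (fun results k =>
    let total := PySem.List.pyGetD snaps k PySem.Dict.empty
    let g := total.values.foldl (fun g v => (Int.gcd g v : Int)) 0
    let best := mLoopB snaps total k (PySem.List.pyRange g 0 (-1)) 1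
    results ++ [best]) []

-- ===== PRECONDITION & SPEC =====
def Spec_max_equal_parts_for_prefixes (packages : String) (out : List Int) : Prop := out = max_equal_parts_for_prefixes_alt packages
instance (packages : String) (out : List Int) : Decidable (Spec_max_equal_parts_for_prefixes packages out) := by unfold Spec_max_equal_parts_for_prefixes; infer_instance

-- ===== CLAIM (what is proved, stated in full; the proofs are below) =====
def Claim_equal_max_equal_parts_for_prefixes : Prop := ∀ (packages : String), Dom_max_equal_parts_for_prefixes packages → Spec_max_equal_parts_for_prefixes packages (max_equal_parts_for_prefixes packages)

-- ===== LEMMAS AND PROOFS =====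

-- A's count_freq update step is the Counter update step
theorem count_freq_step (d : PySem.Dict Char Int) (c : Char) :
    (let f1 := if d.contains c then d else d.insert c (0:Int);
     f1.insert c (f1.getD c 0 + 1)) = d.insert c (d.getD c 0 + 1) := by
  by_cases h : d.contains c = true
  · simp [h]
  · have h' : d.contains c = false := by simpa using h
    have hfind : ∀ p ∈ d.items, (p.1 == c) = false := by
      simp only [PySem.Dict.contains, List.any_eq_false] at h'
      intro p hp; simpa using h' p hp
    have hnone : d.items.find? (fun p => p.1 == c) = none :=
      List.find?_eq_none.mpr (fun p hp => by simp [hfind p hp])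
    have hg : (d.insert c (0:Int)).getD c 0 = 0 := by
      simp [PySem.Dict.getD, PySem.Dict.get?_insert_self]
    simp only [h', Bool.false_eq_true, if_false, hg]
    apply PySem.Dict.ext
    have hc2 : (PySem.Dict.mk (d.items ++ [(c, (0:Int))])).contains c = true := by
      simp [PySem.Dict.contains]
    simp only [PySem.Dict.insert, h', Bool.false_eq_true, if_false, PySem.Dict.getD,
      PySem.Dict.get?, hnone, Option.map_none, Option.getD_none]
    simp only [show (PySem.Dict.mk (d.items ++ [(c, (0:Int))])).contains c = true from hc2, if_true]
    simp only [List.map_append, List.map_cons, List.map_nil, BEq.refl, if_true]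
    have : d.items.map (fun p => if (p.1 == c) = true then (c, (0:Int)+1) else p) = d.items.map id :=
      List.map_congr_left (fun p hp => by simp [hfind p hp])
    simp only [this, List.map_id]

-- A's count_freq is Counter
theorem count_freq_eq_counter (l : List Char) : count_freq l = PySem.Dict.counter l := by
  unfold count_freq
  rw [show (fun (freq : PySem.Dict Char Int) c =>
      let f1 := if freq.contains c then freq else freq.insert c (0:Int)
      f1.insert c (f1.getD c 0 + 1)) = (fun d x => d.insert x (d.getD x 0 + 1)) from
    funext fun d => funext fun c => count_freq_step d c]
  exact PySem.Dict.foldl_insert_getD_add_one_eq_counter l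

theorem buildSnaps_getD (l : List Char) : ∀ (d : PySem.Dict Char Int) (j : Nat), j < l.length →
    (buildSnaps l d).getD j PySem.Dict.empty
      = (l.take (j+1)).foldl (fun d c => d.insert c (d.getD c 0 + 1)) d := by
  induction l with
  | nil => intro d j h; simp at h
  | cons c cs ih =>
    intro d j h
    cases j with
    | zero => simp [buildSnaps]
    | succ j' =>
      simp only [buildSnaps, List.getD_cons_succ, List.take_succ_cons, List.foldl_cons]
      exact ih _ j' (by simpa using h)

-- snapshot lookup: (empty :: buildSnaps s empty)[j] = Counter of the length-j prefix
theorem snapsAt (s : List Char) (j : Nat) (hj : j ≤ s.length) :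
    PySem.List.pyGetD (PySem.Dict.empty :: buildSnaps s PySem.Dict.empty) (j : Int) PySem.Dict.empty
      = PySem.Dict.counter (s.take j) := by
  rw [PySem.List.pyGetD_natCast]
  cases j with
  | zero => rfl
  | succ j' =>
    rw [List.getD_cons_succ, buildSnaps_getD s _ j' (by omega),
      PySem.Dict.foldl_insert_getD_add_one_eq_counter]

-- the two gcd computations agree on the values of a nonempty Counter
theorem gcd_eq (l : List Char) (hl : l ≠ []) :
    gcd_list (PySem.Dict.counter l).values
      = (PySem.Dict.counter l).values.foldl (fun g v => (Int.gcd g v : Int)) 0 := by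
  have hv : (PySem.Dict.counter l).values
      = (PySem.Set.ofList l).map (fun k => ((l.count k : Nat) : Int)) := by
    simp [PySem.Dict.values, PySem.Dict.items_counter, List.map_map, Function.comp]
  obtain ⟨c0, cs, hc⟩ := List.exists_cons_of_ne_nil
    (show PySem.Set.ofList l ≠ [] by
      obtain ⟨x, xs, rfl⟩ := List.exists_cons_of_ne_nil hl
      intro hemp
      have := (PySem.Set.mem_ofList (x :: xs) x).mpr (by simp)
      simp [hemp] at this)
  rw [gcd_list, hv, hc, PySem.List.slice_from_one]
  simp only [List.map_cons, List.tail_cons, List.foldl_cons]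
  rw [PySem.List.pyGetD_ofNat']
  simp [Int.gcd]

-- Python dict equality of two Counters is pointwise count equality
theorem pyDictEq_counter (a b : List Char) :
    pyDictEq (PySem.Dict.counter a) (PySem.Dict.counter b) = true ↔ ∀ c, a.count c = b.count c := by
  simp only [pyDictEq, Bool.and_eq_true, List.all_eq_true, PySem.Dict.keys_counter,
    PySem.Set.mem_ofList, PySem.Dict.contains_counter, PySem.Dict.getD_counter, beq_iff_eq,
    List.contains_iff_mem, Nat.cast_inj]
  constructor
  · rintro ⟨h1, h2⟩ c
    by_cases hc : c ∈ a
    · exact (h1 c hc).2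
    · rw [List.count_eq_zero.mpr hc, Eq.comm, List.count_eq_zero]
      intro hcb; exact hc (h2 c hcb)
  · intro h
    refine ⟨fun c hc => ⟨?_, h c⟩, fun c hc => ?_⟩
    · exact List.count_pos_iff.mp (by rw [← h c]; exact List.count_pos_iff.mpr hc)
    · exact List.count_pos_iff.mp (by rw [h c]; exact List.count_pos_iff.mpr hc)

-- the pure counting fact: equal-frequency segments ⇔ proportional prefix counts
theorem seg_prop (s : List Char) (M Ln : Nat) (hM : 0 < M) :
    (∀ I : Nat, 1 ≤ I → I < M → ∀ c : Char,
        ((s.drop (I*Ln)).take Ln).count c = (s.take Ln).count c)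
  ↔ (∀ I : Nat, 1 ≤ I → I < M → ∀ c : Char,
        M * (s.take (I*Ln)).count c = I * (s.take (M*Ln)).count c) := by
  have fact0 : ∀ (A B : Nat) (c : Char),
      (s.take (A+B)).count c = (s.take A).count c + ((s.drop A).take B).count c := by
    intro A B c; rw [List.take_add, List.count_append]
  constructor
  · intro hP
    have aux : ∀ I ≤ M, ∀ c, (s.take (I*Ln)).count c = I * (s.take Ln).count c := by
      intro I
      induction I with
      | zero => intro _ c; simp
      | succ I' ih =>
        intro hI c
        have h1 : (I'+1)*Ln = I'*Ln + Ln := by ring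
        rw [h1, fact0]
        rcases Nat.eq_zero_or_pos I' with h0 | hpos
        · subst h0; simp
        · rw [ih (by omega) c, hP I' hpos (by omega) c]; ring
    intro I h1 h2 c
    rw [aux I (by omega) c, aux M (le_refl M) c]; ring
  · intro hQ I h1 h2 c
    have key : ∀ J, 1 ≤ J → J ≤ M →
        M * (s.take (J*Ln)).count c = J * (s.take (M*Ln)).count c := by
      intro J hJ1 hJ2
      rcases Nat.lt_or_ge J M with h | h
      · exact hQ J hJ1 h c
      · have : J = M := by omega
        subst this; ring
    have e1 := key I h1 (by omega)
    have e2 := key (I+1) (by omega) (by omega)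
    have hseg : M * ((s.drop (I*Ln)).take Ln).count c = M * (s.take Ln).count c := by
      have h3 : (I+1)*Ln = I*Ln + Ln := by ring
      rw [h3, fact0, Nat.mul_add, Nat.succ_mul] at e2
      have e3 := key 1 (le_refl 1) (by omega)
      rw [one_mul] at e3
      omega
    exact Nat.eq_of_mul_eq_mul_left hM hseg

-- A's valid flag loop is an all
theorem validLoopA_eq_all (pre : List Char) (t : PySem.Dict Char Int) (L : Int) (is : List Int) :
    validLoopA pre t L is = is.all (fun i =>
      pyDictEq (count_freq (PySem.List.slice pre (some (i * L)) (some ((i + 1) * L)))) t) := by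
  induction is with
  | nil => rfl
  | cons i rest ih =>
    simp only [validLoopA, List.all_cons]
    cases h : pyDictEq (count_freq (PySem.List.slice pre (some (i * L)) (some ((i + 1) * L)))) t
    · simp [h]
    · simp [h, ih]

-- the two validity tests agree on every admissible candidate split
theorem valid_eq (s : List Char) (j M Ln : Nat) (hj : j ≤ s.length) (hM : 0 < M)
    (hk : j = M * Ln) :
    validLoopA (s.take j) (count_freq (PySem.List.slice (s.take j) none (some ((Ln : Nat) : Int))))
        ((Ln : Nat) : Int) (PySem.List.pyRange 1 (M : Int) 1)
      = validB (PySem.Dict.empty :: buildSnaps s PySem.Dict.empty)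
          (PySem.Dict.counter (s.take j)) (M : Int) ((Ln : Nat) : Int) := by
  have hLnj : Ln ≤ j := by subst hk; exact Nat.le_mul_of_pos_left Ln hM
  have htarget : count_freq (PySem.List.slice (s.take j) none (some ((Ln : Nat) : Int)))
      = PySem.Dict.counter (s.take Ln) := by
    rw [PySem.List.slice_to _ (by positivity), Int.toNat_natCast, List.take_take,
      min_eq_left hLnj, count_freq_eq_counter]
  have elemA : ∀ I : Nat, 1 ≤ I → I < M →
      (pyDictEq (count_freq (PySem.List.slice (s.take j) (some (((I : Nat) : Int) * ((Ln : Nat) : Int)))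
          (some ((((I : Nat) : Int) + 1) * ((Ln : Nat) : Int)))))
        (PySem.Dict.counter (s.take Ln)) = true
      ↔ ∀ c, ((s.drop (I*Ln)).take Ln).count c = (s.take Ln).count c) := by
    intro I h1 h2
    have e1 : ((I : Nat) : Int) * ((Ln : Nat) : Int) = ((I*Ln : Nat) : Int) := by push_cast; ring
    have e2 : (((I : Nat) : Int) + 1) * ((Ln : Nat) : Int) = (((I+1)*Ln : Nat) : Int) := by
      push_cast; ring
    have e3 : (I+1)*Ln - I*Ln = Ln := by rw [Nat.succ_mul]; omega
    have e4 : Ln ≤ j - I*Ln := by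
      subst hk
      have : (I+1)*Ln ≤ M*Ln := Nat.mul_le_mul_right Ln (by omega)
      rw [Nat.succ_mul] at this; omega
    rw [e1, e2, PySem.List.slice_natCast, e3, List.drop_take, List.take_take,
      min_eq_left e4, count_freq_eq_counter]
    exact pyDictEq_counter _ _
  have elemB : ∀ I : Nat, 1 ≤ I → I < M →
      (((PySem.Dict.counter (s.take j)).items.all (fun cv =>
        (PySem.List.pyGetD (PySem.Dict.empty :: buildSnaps s PySem.Dict.empty)
          (((I : Nat) : Int) * ((Ln : Nat) : Int)) PySem.Dict.empty).getD cv.1 0 * (M : Int)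
          == cv.2 * ((I : Nat) : Int))) = true
      ↔ ∀ c : Char, M * (s.take (I*Ln)).count c = I * (s.take (M*Ln)).count c) := by
    intro I h1 h2
    have e1 : ((I : Nat) : Int) * ((Ln : Nat) : Int) = ((I*Ln : Nat) : Int) := by push_cast; ring
    have hIj : I*Ln ≤ j := by
      subst hk; exact Nat.mul_le_mul_right Ln (by omega)
    rw [e1, snapsAt s (I*Ln) (le_trans hIj hj), List.all_eq_true]
    simp only [PySem.Dict.items_counter, List.mem_map, forall_exists_index, and_imp,
      PySem.Dict.getD_counter, beq_iff_eq]
    rw [← hk]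
    constructor
    · intro h c
      by_cases hc : c ∈ s.take j
      · have hmem : c ∈ PySem.Set.ofList (s.take j) := (PySem.Set.mem_ofList _ _).mpr hc
        have := h _ c hmem rfl
        simp only at this
        have h' : ((M * (s.take (I*Ln)).count c : Nat) : Int)
            = ((I * (s.take j).count c : Nat) : Int) := by push_cast; linarith
        exact_mod_cast h'
      · have hz1 : (s.take j).count c = 0 := List.count_eq_zero.mpr hc
        have hz2 : (s.take (I*Ln)).count c = 0 := by
          rw [List.count_eq_zero]
          intro hmem
          have hsub : (s.take (I*Ln)).Sublist (s.take j) := by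
            rw [← min_eq_left hIj, ← List.take_take]; exact List.take_sublist _ _
          exact hc (List.Sublist.mem hmem hsub)
        simp [hz1, hz2]
    · intro h cv c hmem hcv
      subst hcv
      simp only
      have h' : ((M * (s.take (I*Ln)).count c : Nat) : Int)
          = ((I * (s.take j).count c : Nat) : Int) := by exact_mod_cast h c
      push_cast at h'
      linarith
  rw [validLoopA_eq_all, validB, htarget, Bool.eq_iff_iff, List.all_eq_true, List.all_eq_true]
  constructor
  · intro h i hi
    obtain ⟨hi1, hi2⟩ := PySem.List.mem_pyRange_one.mp hi
    lift i to Nat using (by omega) with I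
    refine (elemB I (by exact_mod_cast hi1) (by exact_mod_cast hi2)).mpr ?_
    refine (seg_prop s M Ln hM).mp ?_ I (by exact_mod_cast hi1) (by exact_mod_cast hi2)
    intro I' g1 g2 c
    exact (elemA I' g1 g2).mp (h ((I' : Nat) : Int)
      (PySem.List.mem_pyRange_one.mpr ⟨by exact_mod_cast g1, by exact_mod_cast g2⟩)) c
  · intro h i hi
    obtain ⟨hi1, hi2⟩ := PySem.List.mem_pyRange_one.mp hi
    lift i to Nat using (by omega) with I
    refine (elemA I (by exact_mod_cast hi1) (by exact_mod_cast hi2)).mpr ?_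
    refine (seg_prop s M Ln hM).mpr ?_ I (by exact_mod_cast hi1) (by exact_mod_cast hi2)
    intro I' g1 g2
    exact (elemB I' g1 g2).mp (h ((I' : Nat) : Int)
      (PySem.List.mem_pyRange_one.mpr ⟨by exact_mod_cast g1, by exact_mod_cast g2⟩))

-- the per-prefix bodies of the two outer folds
def bestA (s : List Char) (k : Int) : Int :=
  mLoopA (PySem.List.slice s none (some k)) k
    (PySem.List.pyRange (gcd_list (count_freq (PySem.List.slice s none (some k))).values) 0 (-1)) 1

def bestB (s : List Char) (k : Int) : Int :=
  mLoopB (PySem.Dict.empty :: buildSnaps s PySem.Dict.empty)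
    (PySem.List.pyGetD (PySem.Dict.empty :: buildSnaps s PySem.Dict.empty) k PySem.Dict.empty) k
    (PySem.List.pyRange
      ((PySem.List.pyGetD (PySem.Dict.empty :: buildSnaps s PySem.Dict.empty) k
        PySem.Dict.empty).values.foldl (fun g v => (Int.gcd g v : Int)) 0) 0 (-1)) 1

-- the two m-loops agree when the valid tests agree
theorem mLoop_eq (pre : List Char) (snaps : List (PySem.Dict Char Int))
    (total : PySem.Dict Char Int) (k : Int) (ms : List Int) (b : Int)
    (h : ∀ m ∈ ms, PySem.Int.mod k m = 0 →
      validLoopA pre (count_freq (PySem.List.slice pre none (some (PySem.Int.floordiv k m))))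
          (PySem.Int.floordiv k m) (PySem.List.pyRange 1 m 1)
        = validB snaps total m (PySem.Int.floordiv k m)) :
    mLoopA pre k ms b = mLoopB snaps total k ms b := by
  induction ms generalizing b with
  | nil => rfl
  | cons m rest ih =>
    have hr := fun m' hm' => h m' (List.mem_cons_of_mem _ hm')
    by_cases hm : PySem.Int.mod k m = 0
    · simp only [mLoopA, mLoopB, hm, ne_eq, not_true_eq_false, if_false]
      rw [h m List.mem_cons_self hm]
      by_cases hv : validB snaps total m (PySem.Int.floordiv k m) = true
      · simp only [hv, if_true]
      · simp only [Bool.not_eq_true] at hv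
        simp only [hv, Bool.false_eq_true, if_false]
        exact ih _ hr
    · simp only [mLoopA, mLoopB, if_pos (show PySem.Int.mod k m ≠ 0 from hm)]
      exact ih _ hr


-- both prefixes give the same best value
theorem best_eq (s : List Char) (k : Int) (hk1 : 1 ≤ k) (hk2 : k < (s.length : Int) + 1) :
    bestA s k = bestB s k := by
  lift k to Nat using (by omega) with j
  have hj1 : 1 ≤ j := by exact_mod_cast hk1
  have hj : j ≤ s.length := by exact_mod_cast (by omega : (j : Int) ≤ (s.length : Int))
  unfold bestA bestB
  have hpre : PySem.List.slice s none (some (j : Int)) = s.take j := by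
    rw [PySem.List.slice_to _ (by positivity), Int.toNat_natCast]
  rw [hpre, snapsAt s j hj, count_freq_eq_counter]
  have hne : s.take j ≠ [] := by
    apply List.ne_nil_of_length_pos; rw [List.length_take]; omega
  rw [gcd_eq _ hne]
  apply mLoop_eq
  intro m hm hmod
  obtain ⟨hm0, -⟩ := PySem.List.mem_pyRange_neg_one.mp hm
  have hdvd : m ∣ (j : Int) := (PySem.Int.mod_eq_zero_iff_dvd _ _).mp hmod
  lift m to Nat using (by omega) with M
  have hMpos : 0 < M := by exact_mod_cast hm0
  have hMdvd : M ∣ j := by exact_mod_cast hdvd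
  rw [PySem.Int.floordiv_natCast]
  exact valid_eq s j M (j / M) hj hMpos (Nat.mul_div_cancel' hMdvd).symm

-- ===== VERDICT (by name: the statement is the Claim_ definition above) =====
theorem max_equal_parts_for_prefixes_spec : Claim_equal_max_equal_parts_for_prefixes := by
  intro packages _
  unfold Spec_max_equal_parts_for_prefixes
  unfold max_equal_parts_for_prefixes max_equal_parts_for_prefixes_alt
  change (PySem.List.pyRange 1 ((packages.toList.length : Int) + 1) 1).foldl
      (fun results k => results ++ [bestA packages.toList k]) []
    = (PySem.List.pyRange 1 ((packages.toList.length : Int) + 1) 1).foldl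
      (fun results k => results ++ [bestB packages.toList k]) []
  rw [PySem.List.foldl_append_singleton_eq_map, PySem.List.foldl_append_singleton_eq_map,
    List.nil_append, List.nil_append]
  apply List.map_congr_left
  intro k hk
  obtain ⟨hk1, hk2⟩ := PySem.List.mem_pyRange_one.mp hk
  exact best_eq packages.toList k hk1 hk2
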